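-- pv_equiv track=rewrite | github.com/parallelno/Vector06c | Vector06c_Dev/_Projects/GameNonameBb/tools/common.py | IndexesToBitLists
-- ===== SOURCE A (Python) =====
-- colorIndexToBit = [
-- 		(0,0,0,0), # color idx = 0
-- 		(0,0,0,1),
-- 		(0,0,1,0), # color idx = 2
-- 		(0,0,1,1),
-- 		(0,1,0,0), # color idx = 4
-- 		(0,1,0,1),
-- 		(0,1,1,0),
-- 		(0,1,1,1),
-- 		(1,0,0,0), # color idx = 8
-- 		(1,0,0,1),
-- 		(1,0,1,0),
-- 		(1,0,1,1),
-- 		(1,1,0,0),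
-- 		(1,1,0,1),
-- 		(1,1,1,0),
-- 		(1,1,1,1),
-- 	]
--
-- def IndexesToBitLists(tileImg):
-- 	bits0 = [] # 8000-9FFF # from left to right, from bottom to top
-- 	bits1 = [] # A000-BFFF
-- 	bits2 = [] # C000-DFFF
-- 	bits3 = [] # E000-FFFF
-- 	for line in tileImg:
-- 		for colorIdx in line:
-- 			bit0, bit1, bit2, bit3 = colorIndexToBit[colorIdx]
-- 			bits0.append(bit0)
-- 			bits1.append(bit1)
-- 			bits2.append(bit2)
-- 			bits3.append(bit3)
-- 	return bits0, bits1, bits2, bits3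
-- ===== SOURCE B (Python) =====
-- def IndexesToBitLists(tileImg):
-- 	# bit arithmetic instead of the lookup table: plane k of color c is bit (3-k) of c % 16
-- 	flat = [c for line in tileImg for c in line]
-- 	bits = [[(c % 16) >> (3 - plane) & 1 for c in flat] for plane in range(4)]
-- 	return bits[0], bits[1], bits[2], bits[3]
-- ===== Notes on version B (the rewrite author's own statement) =====
-- stated objective: alternative
-- what changed: Replaces the 16-entry lookup table and the nested four-way append loop by pure bit arithmetic: flatten once, then compute each bitplane as (c % 16) >> (3 - plane) & 1 in four staged passes.
import Mathlib
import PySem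

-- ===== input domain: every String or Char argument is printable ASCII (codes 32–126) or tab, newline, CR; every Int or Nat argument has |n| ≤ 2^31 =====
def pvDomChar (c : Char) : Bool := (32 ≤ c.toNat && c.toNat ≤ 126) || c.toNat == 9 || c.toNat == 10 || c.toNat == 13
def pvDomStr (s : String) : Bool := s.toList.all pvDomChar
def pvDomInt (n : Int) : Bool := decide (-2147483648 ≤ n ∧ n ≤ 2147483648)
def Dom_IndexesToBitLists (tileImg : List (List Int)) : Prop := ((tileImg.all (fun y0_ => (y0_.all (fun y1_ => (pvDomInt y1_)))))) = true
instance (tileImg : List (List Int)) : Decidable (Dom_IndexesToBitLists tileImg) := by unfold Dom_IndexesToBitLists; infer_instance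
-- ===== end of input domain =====

-- B drops the lookup table and the four-way append loop: it flattens once and computes each
-- bitplane arithmetically as (c % 16) >> (3 - plane) & 1 (alternative algorithm, same cost).

-- the module-level lookup table colorIndexToBit (context of A)
def colorIndexToBit : List (Int × Int × Int × Int) :=
  [(0,0,0,0),(0,0,0,1),(0,0,1,0),(0,0,1,1),
   (0,1,0,0),(0,1,0,1),(0,1,1,0),(0,1,1,1),
   (1,0,0,0),(1,0,0,1),(1,0,1,0),(1,0,1,1),
   (1,1,0,0),(1,1,0,1),(1,1,1,0),(1,1,1,1)]

-- ===== PORT A =====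
-- nested loop over lines and pixels, appending to four accumulator lists;
-- colorIndexToBit[colorIdx] is ported with PySem.List.pyGet? (none = IndexError, excluded by Pre_)
def IndexesToBitLists (tileImg : List (List Int)) : List Int × List Int × List Int × List Int :=
  tileImg.foldl
    (fun acc line =>
      line.foldl
        (fun (acc : List Int × List Int × List Int × List Int) colorIdx =>
          let t := (PySem.List.pyGet? colorIndexToBit colorIdx).getD (0,0,0,0)
          (acc.1 ++ [t.1], acc.2.1 ++ [t.2.1], acc.2.2.1 ++ [t.2.2.1], acc.2.2.2 ++ [t.2.2.2]))
        acc)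
    ([], [], [], [])

-- ===== PORT B =====
-- Source B: flatten once; then for plane = 0..3 compute (c % 16) >> (3 - plane) & 1 per pixel.
-- c % 16 is Python floor-mod = PySem.Int.mod; the shifted value is in [0,16) so >> and & on
-- nonnegative ints coincide with Int.shiftRight/Int.land (exact); 3 - plane is 0..3 so .toNat is exact.
def IndexesToBitLists_alt (tileImg : List (List Int)) : List Int × List Int × List Int × List Int :=
  let flat := tileImg.flatMap (fun line => line)
  let bits := (PySem.List.pyRange 0 4 1).map
    (fun plane => flat.map (fun c => Int.land (Int.shiftRight (PySem.Int.mod c 16) (3 - plane).toNat) 1))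
  (bits.getD 0 [], bits.getD 1 [], bits.getD 2 [], bits.getD 3 [])

-- ===== PRECONDITION & SPEC =====
-- Pre_ excludes exactly the inputs where colorIndexToBit[colorIdx] raises IndexError
-- (A raises there): every color index must lie in -16 ≤ c < 16.
def Pre_IndexesToBitLists (tileImg : List (List Int)) : Prop :=
  ∀ line ∈ tileImg, ∀ c ∈ line, -16 ≤ c ∧ c < 16
instance (tileImg : List (List Int)) : Decidable (Pre_IndexesToBitLists tileImg) := by
  unfold Pre_IndexesToBitLists; infer_instance
def pvWitness_IndexesToBitLists : List (List Int) := [[0, 1, 15], [-1, 8]]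

def Spec_IndexesToBitLists (tileImg : List (List Int)) (out : List Int × List Int × List Int × List Int) : Prop := out = IndexesToBitLists_alt tileImg
instance (tileImg : List (List Int)) (out : List Int × List Int × List Int × List Int) : Decidable (Spec_IndexesToBitLists tileImg out) := by unfold Spec_IndexesToBitLists; infer_instance

-- ===== CLAIM (what is proved, stated in full; the proofs are below) =====
def Claim_equal_IndexesToBitLists : Prop := ∀ (tileImg : List (List Int)), Dom_IndexesToBitLists tileImg → Pre_IndexesToBitLists tileImg → Spec_IndexesToBitLists tileImg (IndexesToBitLists tileImg)

-- ===== LEMMAS AND PROOFS =====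

-- the per-pixel functions of the two ports
def pvLook (c : Int) : Int × Int × Int × Int :=
  (PySem.List.pyGet? colorIndexToBit c).getD (0,0,0,0)
def pvBit (plane : Int) (c : Int) : Int :=
  Int.land (Int.shiftRight (PySem.Int.mod c 16) (3 - plane).toNat) 1

-- on the in-range indices the table lookup agrees with the bit arithmetic, componentwise
lemma look_eq_bits (c : Int) (h1 : -16 ≤ c) (h2 : c < 16) :
    pvLook c = (pvBit 0 c, pvBit 1 c, pvBit 2 c, pvBit 3 c) := by
  interval_cases c <;> decide

lemma inner_foldl (line : List Int) (acc : List Int × List Int × List Int × List Int) :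
    line.foldl
      (fun (acc : List Int × List Int × List Int × List Int) colorIdx =>
        let t := pvLook colorIdx
        (acc.1 ++ [t.1], acc.2.1 ++ [t.2.1], acc.2.2.1 ++ [t.2.2.1], acc.2.2.2 ++ [t.2.2.2]))
      acc
    = (acc.1 ++ (line.map pvLook).map (·.1),
       acc.2.1 ++ (line.map pvLook).map (·.2.1),
       acc.2.2.1 ++ (line.map pvLook).map (·.2.2.1),
       acc.2.2.2 ++ (line.map pvLook).map (·.2.2.2)) := by
  induction line generalizing acc with
  | nil => simp
  | cons c cs ih => simp [ih]

lemma outer_foldl (tileImg : List (List Int)) (acc : List Int × List Int × List Int × List Int) :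
    tileImg.foldl
      (fun acc line =>
        line.foldl
          (fun (acc : List Int × List Int × List Int × List Int) colorIdx =>
            let t := pvLook colorIdx
            (acc.1 ++ [t.1], acc.2.1 ++ [t.2.1], acc.2.2.1 ++ [t.2.2.1], acc.2.2.2 ++ [t.2.2.2]))
          acc)
      acc
    = (acc.1 ++ ((tileImg.flatMap (fun l => l)).map pvLook).map (·.1),
       acc.2.1 ++ ((tileImg.flatMap (fun l => l)).map pvLook).map (·.2.1),
       acc.2.2.1 ++ ((tileImg.flatMap (fun l => l)).map pvLook).map (·.2.2.1),
       acc.2.2.2 ++ ((tileImg.flatMap (fun l => l)).map pvLook).map (·.2.2.2)) := by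
  induction tileImg generalizing acc with
  | nil => simp
  | cons l ls ih =>
    rw [List.foldl_cons, inner_foldl, ih]
    simp [List.append_assoc]

-- ===== VERDICT (by name: the statement is the Claim_ definition above) =====
theorem IndexesToBitLists_spec : Claim_equal_IndexesToBitLists := by
  intro tileImg _ hpre
  unfold Spec_IndexesToBitLists IndexesToBitLists IndexesToBitLists_alt
  have h := outer_foldl tileImg ([], [], [], [])
  simp only [pvLook] at h
  rw [show (PySem.List.pyRange 0 4 1) = [0,1,2,3] from by decide]
  simp only [List.map_cons, List.map_nil, List.getD_cons_zero, List.getD_cons_succ]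
  rw [h]
  have hall : ∀ c ∈ tileImg.flatMap (fun l => l), -16 ≤ c ∧ c < 16 := by
    intro c hc
    rcases List.mem_flatMap.mp hc with ⟨l, hl, hcl⟩
    exact hpre l hl c hcl
  have key : (tileImg.flatMap (fun l => l)).map pvLook
      = (tileImg.flatMap (fun l => l)).map (fun c => (pvBit 0 c, pvBit 1 c, pvBit 2 c, pvBit 3 c)) := by
    apply List.map_congr_left
    intro c hc
    exact look_eq_bits c (hall c hc).1 (hall c hc).2
  rw [key]
  simp [pvBit, List.map_map, Function.comp_def]
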